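-- pv_equiv track=rewrite | github.com/JohnnyFiv3r/Core-Memory | core_memory/retrieval/query_norm.py | _is_memory_intent
-- ===== SOURCE A (Python) =====
-- def _is_memory_intent(text: str) -> bool:
--     """Detect if query indicates memory recall intent."""
--     q = (text or "").lower()
--     cues = [
--         "remember",
--         "what did we decide",
--         "earlier",
--         "last time",
--         "previous",
--         "why did we",
--         "recall",
--         "history",
--         "find memory",
--     ]
--     return any(c in q for c in cues)
-- ===== SOURCE B (Python) =====
-- _CUES = ("remember", "what did we decide", "earlier", "last time", "previous",
--          "why did we", "recall", "history", "find memory")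
--
--
-- def _low(ch):
--     return chr(ord(ch) + 32) if 'A' <= ch <= 'Z' else ch
--
--
-- def _starts_at(s, i, cue):
--     if i + len(cue) > len(s):
--         return False
--     for j in range(len(cue)):
--         if _low(s[i + j]) != cue[j]:
--             return False
--     return True
--
--
-- def _is_memory_intent(text: str) -> bool:
--     """Detect if query indicates memory recall intent.
--
--     One left-to-right scan of the raw text: at each position compare
--     characters against each cue, lowercasing on the fly -- no pre-lowered
--     copy of the text and no per-cue substring search."""
--     s = text or ""
--     for i in range(len(s)):
--         for cue in _CUES:
--             if _starts_at(s, i, cue):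
--                 return True
--     return False
-- ===== Notes on version B (the rewrite author's own statement) =====
-- stated objective: alternative
-- what changed: Replaces lowering the whole text and running nine independent substring searches with a single position-major scan of the raw text that lowercases characters on the fly and matches each cue character by character.
import Mathlib
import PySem

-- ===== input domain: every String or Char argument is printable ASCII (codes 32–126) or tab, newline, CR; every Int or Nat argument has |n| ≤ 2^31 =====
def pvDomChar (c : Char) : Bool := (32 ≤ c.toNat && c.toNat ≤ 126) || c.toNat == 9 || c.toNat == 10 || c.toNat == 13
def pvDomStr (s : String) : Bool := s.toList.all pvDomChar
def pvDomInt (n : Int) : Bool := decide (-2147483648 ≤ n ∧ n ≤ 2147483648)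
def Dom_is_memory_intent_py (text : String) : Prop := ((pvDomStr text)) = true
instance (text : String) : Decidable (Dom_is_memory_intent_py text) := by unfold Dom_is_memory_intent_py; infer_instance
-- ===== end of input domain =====

-- B scans the raw text once, lowercasing on the fly and matching cues char by char, instead of lowering the whole text and running one substring search per cue; same cost, no speed claim.

-- ===== PORT A =====
-- the cue list of A
def pvCuesA : List (List Char) :=
  [ "remember".toList, "what did we decide".toList, "earlier".toList,
    "last time".toList, "previous".toList, "why did we".toList,
    "recall".toList, "history".toList, "find memory".toList ]

def is_memory_intent_py (text : String) : Bool :=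
  -- q = (text or "").lower()  (for a str, `text or ""` is text unless empty)
  let q : List Char := PySem.Chars.lower (if text.toList = [] then [] else text.toList)
  -- any(c in q for c in cues)
  pvCuesA.any (fun c => PySem.Chars.isIn c q)

-- ===== PORT B =====
-- Source B's _CUES tuple (kept as strings; matched char by char via .toList)
def pvCuesB : List String :=
  [ "remember", "what did we decide", "earlier", "last time", "previous",
    "why did we", "recall", "history", "find memory" ]

-- Source B's _low: chr(ord(ch)+32) if 'A' <= ch <= 'Z' else ch  (exact)
def pvLow (c : Char) : Char := if 'A' ≤ c ∧ c ≤ 'Z' then Char.ofNat (c.toNat + 32) else c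

-- Source B's _starts_at(s, i, cue) on the suffix s[i:]: the inner j-loop comparing
-- _low(s[i+j]) with cue[j] is structural recursion on (suffix, cue); running out of
-- suffix with cue left is exactly the i+len(cue) > len(s) early False.
def pvStartsAt : List Char → List Char → Bool
  | _, [] => true
  | [], _ :: _ => false
  | a :: s, b :: p => pvLow a == b && pvStartsAt s p

-- Source B's outer for-i loop: position i of the while-scan is the suffix s.drop i;
-- i ranges over 0..len(s)-1, i.e. over the nonempty suffixes.
def pvScan : List Char → Bool
  | [] => false
  | a :: s => pvCuesB.any (fun cue => pvStartsAt (a :: s) cue.toList) || pvScan s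

def is_memory_intent_py_alt (text : String) : Bool :=
  -- s = text or ""
  let s : List Char := if text.toList = [] then [] else text.toList
  pvScan s

-- ===== PRECONDITION & SPEC =====
def Spec_is_memory_intent_py (text : String) (out : Bool) : Prop := out = is_memory_intent_py_alt text
instance (text : String) (out : Bool) : Decidable (Spec_is_memory_intent_py text out) := by unfold Spec_is_memory_intent_py; infer_instance

-- ===== CLAIM (what is proved, stated in full; the proofs are below) =====
def Claim_equal_is_memory_intent_py : Prop := ∀ (text : String), Dom_is_memory_intent_py text → Spec_is_memory_intent_py text (is_memory_intent_py text)

-- ===== LEMMAS AND PROOFS =====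

-- Source B's per-char lowering agrees with Python str.lower per character (PySem.Chars.lowerChar)
theorem pvLow_eq_lowerChar (c : Char) : pvLow c = PySem.Chars.lowerChar c := by
  unfold pvLow PySem.Chars.lowerChar PySem.Chars.isupper
  rcases Decidable.em ('A' ≤ c ∧ c ≤ 'Z') with h | h
  · rw [if_pos h, if_pos (by simpa using h)]
  · rw [if_neg h, if_neg (by simpa using h)]

theorem pvStartsAt_iff (s p : List Char) :
    pvStartsAt s p = true ↔ p <+: s.map pvLow := by
  induction s generalizing p with
  | nil =>
    cases p with
    | nil => simp [pvStartsAt]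
    | cons b p' => simp [pvStartsAt]
  | cons a s ih =>
    cases p with
    | nil => simp [pvStartsAt]
    | cons b p' =>
      simp only [pvStartsAt, Bool.and_eq_true, beq_iff_eq, List.map_cons,
        List.cons_prefix_cons, ih]
      exact and_congr eq_comm Iff.rfl

theorem pvScan_iff (s : List Char) :
    pvScan s = true ↔ ∃ cue ∈ pvCuesB, cue.toList ≠ [] ∧ ∃ j, cue.toList <+: (s.map pvLow).drop j := by
  induction s with
  | nil =>
    simp only [pvScan, List.map_nil, List.drop_nil, List.prefix_nil]
    constructor
    · intro h; exact absurd h (by decide)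
    · rintro ⟨cue, _, hne, _, h⟩; exact absurd h hne
  | cons a s ih =>
    simp only [pvScan, Bool.or_eq_true, List.any_eq_true, ih]
    constructor
    · rintro (⟨cue, hc, hp⟩ | ⟨cue, hc, hne, j, hp⟩)
      · refine ⟨cue, hc, ?_, 0, by simpa using (pvStartsAt_iff _ _).mp hp⟩
        have : ∀ c ∈ pvCuesB, c.toList ≠ [] := by decide
        exact this cue hc
      · exact ⟨cue, hc, hne, j + 1, by simpa using hp⟩
    · rintro ⟨cue, hc, hne, j, hp⟩
      cases j with
      | zero => exact Or.inl ⟨cue, hc, (pvStartsAt_iff _ _).mpr (by simpa using hp)⟩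
      | succ j => exact Or.inr ⟨cue, hc, hne, j, by simpa using hp⟩

theorem pvMain (q : List Char) :
    pvCuesA.any (fun c => PySem.Chars.isIn c (PySem.Chars.lower q)) = pvScan q := by
  have hlower : PySem.Chars.lower q = q.map pvLow := by
    show q.map PySem.Chars.lowerChar = q.map pvLow
    exact List.map_congr_left (fun c _ => (pvLow_eq_lowerChar c).symm)
  rw [Bool.eq_iff_iff]
  simp only [List.any_eq_true, hlower, ← PySem.Chars.exists_prefix_drop_iff_isIn, pvScan_iff]
  constructor
  · rintro ⟨c, hc, j, hp⟩
    obtain ⟨cue, hcue, rfl⟩ := List.mem_map.mp (show c ∈ pvCuesB.map String.toList from hc)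
    refine ⟨cue, hcue, ?_, j, hp⟩
    have h9 : ∀ c ∈ pvCuesB, c.toList ≠ [] := by decide
    exact h9 cue hcue
  · rintro ⟨cue, hcue, _, j, hp⟩
    exact ⟨cue.toList, List.mem_map.mpr ⟨cue, hcue, rfl⟩, j, hp⟩

-- ===== VERDICT (by name: the statement is the Claim_ definition above) =====
theorem is_memory_intent_py_spec : Claim_equal_is_memory_intent_py := by
  intro text _
  unfold Spec_is_memory_intent_py is_memory_intent_py is_memory_intent_py_alt
  exact pvMain _
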